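-- pv_equiv track=rewrite | github.com/codered-engineering/CodeReferences | Python/Projects/GoogleKickstart/ExerciseAugust22/SherlockAndWatson/SherlockWatson.py | calcPairs
-- ===== SOURCE A (Python) =====
-- def calcPairs(A, B, N, K):
--     total = 0
--     for i in range(1, N+1):
--         iAmodK = (i ** A) % K
--         for j in range(1, N+1):
--             if i == j:
--                 None
--             elif (iAmodK + (j**B)) % K == 0:
--                 total += 1
--     return total % 1000000007
-- ===== SOURCE B (Python) =====
-- def calcPairs(A, B, N, K):
--     # Bucket j's by the residue of j**B mod K, then for each i add the count of
--     # the complementary residue; subtract the diagonal pairs i == j.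
--     cnt = {}
--     for j in range(1, N + 1):
--         r = pow(j, B, K)
--         cnt[r] = cnt.get(r, 0) + 1
--     total = 0
--     for i in range(1, N + 1):
--         total += cnt.get((-pow(i, A, K)) % K, 0)
--     diag = 0
--     for i in range(1, N + 1):
--         if (pow(i, A, K) + pow(i, B, K)) % K == 0:
--             diag += 1
--     return (total - diag) % 1000000007
-- ===== Notes on version B (the rewrite author's own statement) =====
-- stated objective: faster
-- what changed: Replaces the O(N^2) nested scan with residue bucketing: count each j's residue of j**B mod K once in a dict, add the count of the complementary residue for every i, and subtract the diagonal i==j cases; modular exponentiation (pow with modulus) replaces the huge exact powers.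
-- outside the precondition, e.g. on calcPairs(-1, 1, 3, 2): A returns 1, B raises ValueError; on calcPairs(1, -2, 3, 5): A returns 0, B returns 2
import Mathlib
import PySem

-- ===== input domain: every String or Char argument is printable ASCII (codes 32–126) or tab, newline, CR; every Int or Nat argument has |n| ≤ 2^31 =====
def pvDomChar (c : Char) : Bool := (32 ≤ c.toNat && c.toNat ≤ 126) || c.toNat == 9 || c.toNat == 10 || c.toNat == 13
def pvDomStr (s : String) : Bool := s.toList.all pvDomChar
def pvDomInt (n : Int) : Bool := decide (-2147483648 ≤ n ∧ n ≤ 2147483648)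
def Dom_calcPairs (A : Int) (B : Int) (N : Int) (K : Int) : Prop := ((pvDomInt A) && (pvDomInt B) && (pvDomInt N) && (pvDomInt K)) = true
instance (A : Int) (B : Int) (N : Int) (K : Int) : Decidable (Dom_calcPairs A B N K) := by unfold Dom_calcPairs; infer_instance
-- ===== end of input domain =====

-- B replaces A's O(N^2) nested scan by residue bucketing (count residues of j**B mod K once,
-- look up the complementary residue for each i, subtract the diagonal): measurably faster.
-- Pre_ excludes K = 0 (A raises ZeroDivisionError when the loop runs) and negative exponents
-- with 1 <= N, where the Python A computes with floats (i ** A is a float for A < 0): not portable.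


-- ===== PORT A =====
-- literal port of A; 'i ** A' is 'i ^ A.toNat', exact on Pre_ (a negative A only occurs there when N < 2, where the value is never used)
def calcPairs (A : Int) (B : Int) (N : Int) (K : Int) : Int :=
  let total : Int :=
    (PySem.List.pyRange 1 (N+1) 1).foldl (fun total i =>
      let iAmodK := PySem.Int.mod (i ^ A.toNat) K
      (PySem.List.pyRange 1 (N+1) 1).foldl (fun total j =>
        if i == j then total
        else if PySem.Int.mod (iAmodK + j ^ B.toNat) K == 0 then total + 1
        else total) total) 0
  PySem.Int.mod total 1000000007

-- ===== PORT B =====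
-- literal port of Source B; pow(x, e, K) is PySem.Int.powMod x e K
def calcPairs_alt (A : Int) (B : Int) (N : Int) (K : Int) : Int :=
  let cnt : PySem.Dict Int Int :=
    (PySem.List.pyRange 1 (N+1) 1).foldl (fun d j =>
      let r := PySem.Int.powMod j B.toNat K
      d.insert r (d.getD r 0 + 1)) PySem.Dict.empty
  let total : Int :=
    (PySem.List.pyRange 1 (N+1) 1).foldl (fun t i =>
      t + cnt.getD (PySem.Int.mod (-(PySem.Int.powMod i A.toNat K)) K) 0) 0
  let diag : Int :=
    (PySem.List.pyRange 1 (N+1) 1).foldl (fun t i =>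
      if PySem.Int.mod (PySem.Int.powMod i A.toNat K + PySem.Int.powMod i B.toNat K) K == 0
      then t + 1 else t) 0
  PySem.Int.mod (total - diag) 1000000007

-- ===== PRECONDITION & SPEC =====
-- Pre_ excludes K = 0 (A raises ZeroDivisionError there whenever the loop runs) and, when the
-- pair loop does real work (2 ≤ N), negative exponents A or B, where the Python A computes through floats
-- (i ** A is a float for A < 0): not portable to Int, and B's pow(i, A, K) behaves differently.
def Pre_calcPairs (A : Int) (B : Int) (N : Int) (K : Int) : Prop := K ≠ 0 ∧ (N < 2 ∨ (0 ≤ A ∧ 0 ≤ B))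
instance (A : Int) (B : Int) (N : Int) (K : Int) : Decidable (Pre_calcPairs A B N K) := by unfold Pre_calcPairs; infer_instance
def pvWitness_calcPairs : Int × Int × Int × Int := (2, 3, 5, 7)

def Spec_calcPairs (A : Int) (B : Int) (N : Int) (K : Int) (out : Int) : Prop := out = calcPairs_alt A B N K
instance (A : Int) (B : Int) (N : Int) (K : Int) (out : Int) : Decidable (Spec_calcPairs A B N K out) := by unfold Spec_calcPairs; infer_instance

-- ===== CLAIM (what is proved, stated in full; the proofs are below) =====
def Claim_equal_calcPairs : Prop := ∀ (A : Int) (B : Int) (N : Int) (K : Int), Dom_calcPairs A B N K → Pre_calcPairs A B N K → Spec_calcPairs A B N K (calcPairs A B N K)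

-- ===== LEMMAS AND PROOFS =====

-- PySem.Int.mod is Python's %, i.e. Int.fmod
theorem pvModEqFmod (a b : Int) : PySem.Int.mod a b = Int.fmod a b := rfl

-- replacing a summand by its residue does not change the residue of the sum
theorem pvAddModRight (x y K : Int) :
    PySem.Int.mod (x + PySem.Int.mod y K) K = PySem.Int.mod (x + y) K := by
  simp only [pvModEqFmod]
  rw [Int.add_fmod x y K, Int.add_fmod x (Int.fmod y K) K, Int.fmod_fmod_of_dvd _ dvd_rfl]

-- B's bucket condition is A's pair condition
theorem pvCondIff (K x y : Int) :
    PySem.Int.mod y K = PySem.Int.mod (-x) K ↔ PySem.Int.mod (x + y) K = 0 := by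
  constructor
  · intro h
    have h1 : PySem.Int.mod (x + y) K = PySem.Int.mod (x + -x) K := by
      rw [← pvAddModRight x y K, h, pvAddModRight]
    simpa using h1
  · intro h
    obtain ⟨t, ht⟩ := (PySem.Int.mod_eq_zero_iff_dvd _ _).mp h
    have hy : y = -x + K * t := by omega
    rw [hy]
    simp only [pvModEqFmod]
    exact Int.add_mul_fmod_self_left (-x) K t

-- counting with the diagonal element removed
theorem pvCountPDiag (l : List Int) (i : Int) (p : Int → Bool) :
    l.countP p = l.countP (fun j => !(i == j) && p j) + (if p i then l.count i else 0) := by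
  induction l with
  | nil => simp
  | cons x xs ih =>
    by_cases hx : i = x
    · subst hx
      by_cases hp : p i <;> simp [List.countP_cons, List.count_cons, hp, ih] <;> omega
    · have hx' : ¬ x = i := fun h => hx h.symm
      by_cases hp : p x <;>
        simp [List.countP_cons, List.count_cons, hx, hx', hp, ih] <;> omega

theorem pvSumMapSub (l : List Int) (f g : Int → Int) :
    (l.map (fun x => f x - g x)).sum = (l.map f).sum - (l.map g).sum := by
  induction l with
  | nil => simp
  | cons x xs ih => simp [ih]; ring

-- ===== VERDICT (by name: the statement is the Claim_ definition above) =====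
-- the two ports agree on every input (the precondition is only about the Python originals)
theorem calcPairs_eq_alt (A B N K : Int) : calcPairs A B N K = calcPairs_alt A B N K := by
  unfold calcPairs calcPairs_alt
  simp only []
  set R := PySem.List.pyRange 1 (N+1) 1 with hR
  set a := A.toNat
  set b := B.toNat
  set cA : Int → Int → Bool :=
    fun i j => PySem.Int.mod (PySem.Int.mod (i ^ a) K + j ^ b) K == 0 with hcA
  -- A's inner loop is a count
  have hInner : ∀ (i t : Int),
      R.foldl (fun total j =>
        if i == j then total
        else if PySem.Int.mod (PySem.Int.mod (i ^ a) K + j ^ b) K == 0 then total + 1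
        else total) t
      = t + (R.countP (fun j => !(i == j) && cA i j) : Int) := by
    intro i t
    rw [PySem.List.foldl_congr_mem R _
        (fun total j => if (fun j => !(i == j) && cA i j) j then total + 1 else total) t ?_]
    · exact PySem.List.foldl_if_add_one _ R t
    · intro acc x _
      by_cases h1 : i == x <;> by_cases h2 : cA i x <;> simp [hcA] at h1 h2 ⊢ <;> simp [h1, h2]
  -- A's outer loop is a sum of counts
  have hAside :
      R.foldl (fun total i =>
        R.foldl (fun total j =>
          if i == j then total
          else if PySem.Int.mod (PySem.Int.mod (i ^ a) K + j ^ b) K == 0 then total + 1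
          else total) total) 0
      = (R.map (fun i => (R.countP (fun j => !(i == j) && cA i j) : Int))).sum := by
    rw [PySem.List.foldl_congr_mem R _
        (fun total i => total + (R.countP (fun j => !(i == j) && cA i j) : Int)) 0
        (fun acc i _ => hInner i acc)]
    rw [PySem.List.foldl_add]; simp
  -- B's dict is a Counter of the residues
  have hCnt :
      R.foldl (fun d j =>
        d.insert (PySem.Int.powMod j b K) (d.getD (PySem.Int.powMod j b K) 0 + 1))
        PySem.Dict.empty
      = PySem.Dict.counter (R.map (fun j => PySem.Int.powMod j b K)) := by
    rw [← List.foldl_map (f := fun j : Int => PySem.Int.powMod j b K)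
        (g := fun (d : PySem.Dict Int Int) (r : Int) => d.insert r (d.getD r 0 + 1))
        (l := R) (init := PySem.Dict.empty)]
    exact PySem.Dict.foldl_insert_getD_add_one_eq_counter _
  -- the bucket lookup for i counts exactly A's matching partners (diagonal included)
  have hLookup : ∀ i : Int,
      ((PySem.Dict.counter (R.map (fun j => PySem.Int.powMod j b K))).getD
        (PySem.Int.mod (-(PySem.Int.powMod i a K)) K) 0)
      = (R.countP (cA i) : Int) := by
    intro i
    rw [PySem.Dict.getD_counter, List.count_eq_countP, List.countP_map]
    congr 1
    apply List.countP_congr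
    intro j _
    simp only [Function.comp, hcA, PySem.Int.powMod_eq, beq_iff_eq]
    exact pvCondIff K (PySem.Int.mod (i ^ a) K) (j ^ b)
  -- B's total loop
  have hBtotal :
      R.foldl (fun t i =>
        t + (PySem.Dict.counter (R.map (fun j => PySem.Int.powMod j b K))).getD
          (PySem.Int.mod (-(PySem.Int.powMod i a K)) K) 0) 0
      = (R.map (fun i => (R.countP (cA i) : Int))).sum := by
    rw [PySem.List.foldl_add]
    simp only [zero_add]
    exact congrArg List.sum (List.map_congr_left (fun i _ => hLookup i))
  -- B's diagonal loop
  have hDiag :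
      R.foldl (fun t i =>
        if PySem.Int.mod (PySem.Int.powMod i a K + PySem.Int.powMod i b K) K == 0
        then t + 1 else t) 0
      = ((R.countP (fun i => cA i i) : Nat) : Int) := by
    rw [PySem.List.foldl_if_add_one]
    simp only [zero_add]
    congr 1
    apply List.countP_congr
    intro i _
    simp only [hcA, PySem.Int.powMod_eq]
    rw [pvAddModRight (PySem.Int.mod (i ^ a) K) (i ^ b) K]
  rw [hAside, hCnt, hBtotal, hDiag]
  -- sums agree elementwise: remove-diagonal count = full count minus the diagonal indicator
  have hPer : ∀ i ∈ R, (R.countP (fun j => !(i == j) && cA i j) : Int)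
      = (R.countP (cA i) : Int) - (if cA i i then (1 : Int) else 0) := by
    intro i hi
    have h1 := pvCountPDiag R i (cA i)
    have h2 : R.count i = 1 :=
      List.count_eq_one_of_mem (PySem.List.nodup_pyRange_one 1 (N+1)) hi
    rw [h2] at h1
    split_ifs at h1 ⊢ <;> push_cast [h1] <;> omega
  rw [List.map_congr_left hPer, pvSumMapSub R (fun i => (R.countP (cA i) : Int))
      (fun i => if cA i i then (1 : Int) else 0)]
  rw [PySem.List.sum_map_ite_one_zero]

theorem calcPairs_spec : Claim_equal_calcPairs := by
  intro A B N K _ _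
  unfold Spec_calcPairs
  exact calcPairs_eq_alt A B N K
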